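-- pv_equiv track=rewrite | github.com/K4liber/web_games | back/bluff/check.py | _big_straight
-- ===== SOURCE A (Python) =====
-- def _big_straight(
--     sequence: str,
--     cards: list[tuple[str, str]]
-- ) -> bool:
--     _needed_figure_to_count = {
--         '10': 0,
--         'jack': 0,
--         'queen': 0,
--         'king': 0,
--         'ace': 0
--     }
--
--     for card in cards:
--         figure = card[0]
--
--         if figure in _needed_figure_to_count:
--             _needed_figure_to_count[figure] += 1
--
--     if all(list(_needed_figure_to_count.values())):
--         return True
--
--     return False
-- ===== SOURCE B (Python) =====
-- def _big_straight(
--     sequence: str,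
--     cards: list[tuple[str, str]]
-- ) -> bool:
--     return all(
--         any(card[0] == figure for card in cards)
--         for figure in ('10', 'jack', 'queen', 'king', 'ace')
--     )
-- ===== Notes on version B (the rewrite author's own statement) =====
-- stated objective: simpler
-- what changed: Drops A's mutable per-figure count dictionary and its increment loop plus the all()-over-values pass; B instead scans the card list once per required figure (all(any(...))) and builds no intermediate structure at all.
import Mathlib
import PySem

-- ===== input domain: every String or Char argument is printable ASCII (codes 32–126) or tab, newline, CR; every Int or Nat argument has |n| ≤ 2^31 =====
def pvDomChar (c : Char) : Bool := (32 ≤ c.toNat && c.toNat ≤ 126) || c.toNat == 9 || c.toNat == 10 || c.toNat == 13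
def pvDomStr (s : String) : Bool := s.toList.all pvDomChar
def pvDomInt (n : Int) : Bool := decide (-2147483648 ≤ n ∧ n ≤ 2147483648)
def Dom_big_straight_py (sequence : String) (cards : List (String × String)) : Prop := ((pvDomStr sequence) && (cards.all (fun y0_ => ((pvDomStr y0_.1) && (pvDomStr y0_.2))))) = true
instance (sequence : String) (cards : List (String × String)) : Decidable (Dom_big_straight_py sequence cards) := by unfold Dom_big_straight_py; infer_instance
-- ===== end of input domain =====

-- B replaces A's mutable count dictionary (one pass, then all() over the values) with
-- five direct scans of the card list — all(any(card[0] == figure ...)) — building no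
-- intermediate structure (objective: simpler).

-- ===== PORT A =====
-- loop body of A's 'for card in cards'
def bsStep (d : PySem.Dict String Int) (card : String × String) : PySem.Dict String Int :=
  let figure := card.1
  if d.contains figure then d.modify figure 0 (fun v => v + 1) else d

def big_straight_py (sequence : String) (cards : List (String × String)) : Bool :=
  let d0 : PySem.Dict String Int :=
    PySem.Dict.ofList [("10", 0), ("jack", 0), ("queen", 0), ("king", 0), ("ace", 0)]
  let d := cards.foldl bsStep d0
  if d.values.all (fun v => v != 0) then true else false

-- ===== PORT B =====
def big_straight_py_alt (sequence : String) (cards : List (String × String)) : Bool :=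
  (["10", "jack", "queen", "king", "ace"] : List String).all
    (fun figure => cards.any (fun card => card.1 == figure))

-- ===== PRECONDITION & SPEC =====
def Spec_big_straight_py (sequence : String) (cards : List (String × String)) (out : Bool) : Prop := out = big_straight_py_alt sequence cards
instance (sequence : String) (cards : List (String × String)) (out : Bool) : Decidable (Spec_big_straight_py sequence cards out) := by unfold Spec_big_straight_py; infer_instance

-- ===== CLAIM (what is proved, stated in full; the proofs are below) =====
def Claim_equal_big_straight_py : Prop := ∀ (sequence : String) (cards : List (String × String)), Dom_big_straight_py sequence cards → Spec_big_straight_py sequence cards (big_straight_py sequence cards)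

-- ===== LEMMAS AND PROOFS =====

theorem bs_loop_keys (cs : List (String × String)) (d : PySem.Dict String Int) :
    (cs.foldl bsStep d).keys = d.keys := by
  induction cs generalizing d with
  | nil => rfl
  | cons c cs ih =>
    simp only [List.foldl_cons, ih, bsStep]
    split_ifs with h
    · rw [PySem.Dict.keys_modify, PySem.Dict.keys_insert_of_contains _ _ h]
    · rfl

theorem bs_loop_getD (cs : List (String × String)) (d : PySem.Dict String Int) (k : String)
    (hk : d.contains k = true) :
    (cs.foldl bsStep d).getD k 0 = d.getD k 0 + ((cs.map Prod.fst).count k : Int) := by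
  induction cs generalizing d with
  | nil => simp
  | cons c cs ih =>
    simp only [List.foldl_cons, List.map_cons]
    by_cases hc : d.contains c.1 = true
    · have hstep : bsStep d c = d.modify c.1 0 (fun v => v + 1) := by
        simp only [bsStep]; rw [if_pos hc]
      have hk' : (bsStep d c).contains k = true := by
        rw [hstep, PySem.Dict.contains_modify]; simp [hk]
      rw [ih _ hk', hstep, PySem.Dict.getD_modify]
      by_cases hkc : k = c.1
      · subst hkc; simp
        ring
      · have hck : c.1 ≠ k := fun h => hkc h.symm
        simp [hkc, hck]
    · have hstep : bsStep d c = d := by simp only [bsStep]; rw [if_neg hc]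
      have hne : c.1 ≠ k := by
        intro h; rw [h] at hc; exact hc hk
      rw [hstep, ih _ hk, List.count_cons]
      simp [hne]

-- ===== VERDICT (by name: the statement is the Claim_ definition above) =====
theorem big_straight_py_spec : Claim_equal_big_straight_py := by
  intro sequence cards _
  show big_straight_py sequence cards = big_straight_py_alt sequence cards
  unfold big_straight_py big_straight_py_alt
  set d0 : PySem.Dict String Int :=
    PySem.Dict.ofList [("10", 0), ("jack", 0), ("queen", 0), ("king", 0), ("ace", 0)] with hd0
  set d := cards.foldl bsStep d0 with hd
  have hkeys : d.keys = ["10", "jack", "queen", "king", "ace"] := by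
    rw [hd, bs_loop_keys]; rfl
  have hnd : d.keys.Nodup := by rw [hkeys]; decide
  have hvals := PySem.Dict.values_eq_map_keys d hnd (0 : Int)
  have hget : ∀ k : String, d0.contains k = true →
      d.getD k 0 = ((cards.map Prod.fst).count k : Int) := by
    intro k hk
    rw [hd, bs_loop_getD _ _ _ hk]
    have h0 : d0.getD k 0 = 0 := by
      rw [PySem.Dict.contains_iff_mem_keys] at hk
      have hmem : k ∈ (["10", "jack", "queen", "king", "ace"] : List String) := hk
      fin_cases hmem <;> rfl
    rw [h0]; ring
  have hif : ∀ b : Bool, (if b = true then true else false) = b := by decide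
  rw [hif, hvals, List.all_map, Bool.eq_iff_iff, List.all_eq_true, List.all_eq_true]
  constructor
  · intro h f hf
    have hk0 : d0.contains f = true := by
      rw [hkeys] at *; fin_cases hf <;> decide
    have hfk : f ∈ d.keys := by
      rw [PySem.Dict.contains_iff_mem_keys] at hk0
      rw [hkeys]; exact hk0
    have hv := h f hfk
    simp only [Function.comp, bne_iff_ne, ne_eq] at hv
    rw [hget f hk0] at hv
    have hcnt : (cards.map Prod.fst).count f ≠ 0 := by exact_mod_cast hv
    have hmem : f ∈ cards.map Prod.fst := List.count_pos_iff.1 (Nat.pos_of_ne_zero hcnt)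
    rw [List.any_eq_true]
    obtain ⟨c, hc, hcf⟩ := List.mem_map.1 hmem
    exact ⟨c, hc, by simp [hcf]⟩
  · intro h k hk
    rw [hkeys] at hk
    have hk0 : d0.contains k = true := by fin_cases hk <;> decide
    have hany := h k hk
    rw [List.any_eq_true] at hany
    obtain ⟨c, hc, hck⟩ := hany
    have hmem : k ∈ cards.map Prod.fst :=
      List.mem_map.2 ⟨c, hc, by simpa using hck⟩
    simp only [Function.comp, bne_iff_ne, ne_eq]
    rw [hget k hk0]
    have hpos : 0 < (cards.map Prod.fst).count k := List.count_pos_iff.2 hmem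
    intro h0
    have : (cards.map Prod.fst).count k = 0 := by exact_mod_cast h0
    omega
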